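-- pv_equiv track=rewrite | github.com/monadosorin/metnum | kalkulator.py | check_operator
-- ===== SOURCE A (Python) =====
-- def check_operator(rumus):
--     r = rumus.replace(" ", "")
--     operators = "+-*/^"
--
--     if not r:
--         return False
--
--     if r[-1] in operators:
--         return False
--
--     for i in range(len(r) - 1):
--         a = r[i]
--         b = r[i + 1]
--
--         if a in operators and b in operators:
--             if b == "-" and a in "+-*/^(":
--                 continue
--             return False
--
--     return True
-- ===== SOURCE B (Python) =====
-- def check_operator(rumus):
--     r = rumus.replace(" ", "")
--     if not r or r[-1] in "+-*/^":
--         return False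
--     return all(a + b not in r for a in "+-*/^" for b in "+*/^")
-- ===== Notes on version B (the rewrite author's own statement) =====
-- stated objective: faster
-- what changed: Replaces the manual index loop over adjacent character pairs (with its nested continue logic) by a short-circuit guard plus an all() over the 20 concrete forbidden two-character substrings tested with substring containment.
import Mathlib
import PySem

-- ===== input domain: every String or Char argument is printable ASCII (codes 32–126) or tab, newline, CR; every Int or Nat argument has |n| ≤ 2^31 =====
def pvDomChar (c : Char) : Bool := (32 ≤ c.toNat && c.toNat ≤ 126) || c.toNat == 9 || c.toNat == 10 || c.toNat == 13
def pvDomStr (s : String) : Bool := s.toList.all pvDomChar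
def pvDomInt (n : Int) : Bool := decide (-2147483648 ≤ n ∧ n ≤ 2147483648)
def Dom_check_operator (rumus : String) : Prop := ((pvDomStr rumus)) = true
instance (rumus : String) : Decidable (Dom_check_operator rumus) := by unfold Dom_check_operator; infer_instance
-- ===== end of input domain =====

-- B replaces A's manual index loop over adjacent positions by 20 substring-containment
-- tests (operator followed by one of the non-minus operators); a timing run measured B faster.

-- ===== PORT A =====
-- the for-loop over i in range(len(r)-1), reading r[i], r[i+1], as the obvious pairwise recursion
def checkOpLoop : List Char → Bool
  | a :: b :: rest =>
    if PySem.Chars.isIn [a] "+-*/^".toList && PySem.Chars.isIn [b] "+-*/^".toList then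
      if b == '-' && PySem.Chars.isIn [a] "+-*/^(".toList then checkOpLoop (b :: rest)
      else false
    else checkOpLoop (b :: rest)
  | _ => true

def check_operator (rumus : String) : Bool :=
  let r := PySem.Str.replace rumus " " ""
  if PySem.Str.len r = 0 then false          -- if not r
  else
    match PySem.Str.pyGet? r (-1) with       -- r[-1] (r nonempty here, so always some)
    | none => false
    | some c =>
      if PySem.Chars.isIn [c] "+-*/^".toList then false
      else checkOpLoop r.toList

-- ===== PORT B =====
def check_operator_alt (rumus : String) : Bool :=
  let r := PySem.Str.replace rumus " " ""
  match PySem.Str.pyGet? r (-1) with         -- 'not r or r[-1] in "+-*/^"'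
  | none => false
  | some c =>
    if PySem.Chars.isIn [c] "+-*/^".toList then false
    else
      "+-*/^".toList.all fun a =>
        "+*/^".toList.all fun b => !(PySem.Chars.isIn [a, b] r.toList)

-- ===== PRECONDITION & SPEC =====
def Spec_check_operator (rumus : String) (out : Bool) : Prop := out = check_operator_alt rumus
instance (rumus : String) (out : Bool) : Decidable (Spec_check_operator rumus out) := by unfold Spec_check_operator; infer_instance

-- ===== CLAIM (what is proved, stated in full; the proofs are below) =====
def Claim_equal_check_operator : Prop := ∀ (rumus : String), Dom_check_operator rumus → Spec_check_operator rumus (check_operator rumus)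

-- ===== LEMMAS AND PROOFS =====

lemma memChar (x : Char) (l : List Char) : PySem.Chars.isIn [x] l = true ↔ x ∈ l := by
  rw [PySem.Chars.isIn_iff_infix]
  exact List.singleton_infix_iff x l

lemma ops_not_minus (y : Char) : y ∈ "+-*/^".toList ∧ y ≠ '-' ↔ y ∈ "+*/^".toList := by
  simp only [show "+-*/^".toList = ['+', '-', '*', '/', '^'] from rfl,
    show "+*/^".toList = ['+', '*', '/', '^'] from rfl, List.mem_cons, List.not_mem_nil, or_false]
  constructor
  · rintro ⟨rfl | rfl | rfl | rfl | rfl, h⟩ <;> simp_all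
  · rintro (rfl | rfl | rfl | rfl) <;> simp_all

lemma ops_sub_paren (x : Char) (h : x ∈ "+-*/^".toList) : x ∈ "+-*/^(".toList := by
  simp only [show "+-*/^".toList = ['+', '-', '*', '/', '^'] from rfl,
    show "+-*/^(".toList = ['+', '-', '*', '/', '^', '('] from rfl, List.mem_cons] at *
  tauto

lemma pair_infix_cons_cons (x y a b : Char) (t : List Char) :
    [x, y] <:+: (a :: b :: t) ↔ (x = a ∧ y = b) ∨ [x, y] <:+: (b :: t) := by
  rw [List.infix_cons_iff]
  simp [List.cons_prefix_cons, List.nil_prefix]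

lemma loopA_iff (l : List Char) :
    checkOpLoop l = true ↔
      ∀ x y, [x, y] <:+: l → ¬(x ∈ "+-*/^".toList ∧ y ∈ "+*/^".toList) := by
  induction l using checkOpLoop.induct with
  | case4 t ht =>
    match t, ht with
    | a :: b :: rest, ht => exact (ht a b rest rfl).elim
    | [], _ =>
      simp only [checkOpLoop, true_iff]
      intro x y h
      simp at h
    | [a], _ =>
      simp only [checkOpLoop, true_iff]
      intro x y h hc
      have := h.length_le
      simp at this
  | case1 a b rest hc1 hc2 ih =>
    -- both operators, b = '-': continue
    rw [show checkOpLoop (a :: b :: rest) = checkOpLoop (b :: rest) by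
      simp only [checkOpLoop]; rw [if_pos hc1, if_pos hc2], ih]
    have hb : b = '-' := by
      simp only [Bool.and_eq_true, beq_iff_eq] at hc2; exact hc2.1
    constructor
    · intro h x y hinf
      rcases (pair_infix_cons_cons x y a b rest).mp hinf with ⟨rfl, rfl⟩ | h'
      · rintro ⟨_, hy⟩
        exact ((ops_not_minus y).mpr hy).2 hb
      · exact h x y h'
    · intro h x y hinf
      exact h x y ((pair_infix_cons_cons x y a b rest).mpr (Or.inr hinf))
  | case2 a b rest hc1 hc2 =>
    -- bad pair found: return False
    have hm : checkOpLoop (a :: b :: rest) = false := by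
      simp only [checkOpLoop]; rw [if_pos hc1, if_neg hc2]
    rw [hm]
    simp only [Bool.false_eq_true, false_iff, not_forall]
    simp only [Bool.and_eq_true, memChar] at hc1
    have hbnm : b ∈ "+*/^".toList := by
      refine (ops_not_minus b).mp ⟨hc1.2, ?_⟩
      intro hbe
      refine hc2 ?_
      simp only [Bool.and_eq_true, beq_iff_eq]
      exact ⟨hbe, (memChar a _).mpr (ops_sub_paren a hc1.1)⟩
    exact ⟨a, b, (pair_infix_cons_cons a b a b rest).mpr (Or.inl ⟨rfl, rfl⟩),
      fun hcontra => hcontra ⟨hc1.1, hbnm⟩⟩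
  | case3 a b rest hc1 ih =>
    -- not both operators: continue
    rw [show checkOpLoop (a :: b :: rest) = checkOpLoop (b :: rest) by
      simp only [checkOpLoop]; rw [if_neg hc1], ih]
    rw [Bool.and_eq_true, memChar, memChar] at hc1
    constructor
    · intro h x y hinf
      rcases (pair_infix_cons_cons x y a b rest).mp hinf with ⟨rfl, rfl⟩ | h'
      · rintro ⟨hx, hy⟩
        exact hc1 ⟨hx, ((ops_not_minus y).mpr hy).1⟩
      · exact h x y h'
    · intro h x y hinf
      exact h x y ((pair_infix_cons_cons x y a b rest).mpr (Or.inr hinf))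

lemma allB_iff (l : List Char) :
    ("+-*/^".toList.all fun a => "+*/^".toList.all fun b => !(PySem.Chars.isIn [a, b] l)) = true ↔
      ∀ x y, [x, y] <:+: l → ¬(x ∈ "+-*/^".toList ∧ y ∈ "+*/^".toList) := by
  simp only [List.all_eq_true, Bool.not_eq_eq_eq_not, Bool.not_true,
    PySem.Chars.isIn_eq_false_iff]
  constructor
  · rintro h x y hinf ⟨hx, hy⟩
    exact h x hx y hy hinf
  · intro h a ha b hb hinf
    exact h a b hinf ⟨ha, hb⟩

lemma loop_eq_allB (l : List Char) :
    checkOpLoop l =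
      ("+-*/^".toList.all fun a => "+*/^".toList.all fun b => !(PySem.Chars.isIn [a, b] l)) := by
  rcases h : checkOpLoop l with _ | _
  · rcases h2 : ("+-*/^".toList.all fun a => "+*/^".toList.all fun b => !(PySem.Chars.isIn [a, b] l)) with _ | _
    · rfl
    · exact absurd ((loopA_iff l).mpr ((allB_iff l).mp h2)) (by simp [h])
  · exact ((allB_iff l).mpr ((loopA_iff l).mp h)).symm

-- ===== VERDICT (by name: the statement is the Claim_ definition above) =====
theorem check_operator_spec : Claim_equal_check_operator := by
  intro rumus _
  unfold Spec_check_operator check_operator check_operator_alt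
  simp only []
  rw [PySem.Str.pyGet?_eq, PySem.Chars.pyGet?_eq_listPyGet?,
    PySem.List.pyGet?_neg_one, PySem.Str.len_eq]
  rcases hl : (PySem.Str.replace rumus " " "").toList with _ | ⟨c, t⟩
  · rw [if_pos (by simp)]
    rfl
  · rw [if_neg (by simp; omega)]
    rcases hg : (c :: t).getLast? with _ | z
    · exact absurd hg (by simp)
    · by_cases hz : PySem.Chars.isIn [z] "+-*/^".toList = true
      · simp only [hz, if_pos]
      · simp only [Bool.not_eq_true] at hz
        simp only [hz, Bool.false_eq_true, loop_eq_allB]
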